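-- pv_equiv track=rewrite | github.com/tayyab3913/RaaiseDashboard | RAAISE-MVP-3/raaise-dashboard-wording-updated/scripts/extract_wall_polylines.py | edge_mask
-- ===== SOURCE A (Python) =====
-- def edge_mask(mask: list[list[int]], w: int, h: int) -> list[list[int]]:
--     """Keep only pixels on the boundary of black regions.
--
--     Thin wall strokes (1-2 px) survive intact. Filled rectangles (desks,
--     label boxes) collapse to their outline so they don't generate parallel
--     scan-line walls through the interior.
--     """
--     out = [[0] * w for _ in range(h)]
--     for y in range(h):
--         for x in range(w):
--             if not mask[y][x]:
--                 continue
--             if (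
--                 (x > 0 and not mask[y][x - 1])
--                 or (x < w - 1 and not mask[y][x + 1])
--                 or (y > 0 and not mask[y - 1][x])
--                 or (y < h - 1 and not mask[y + 1][x])
--             ):
--                 out[y][x] = 1
--     return out
-- ===== SOURCE B (Python) =====
-- def edge_mask(mask: list[list[int]], w: int, h: int) -> list[list[int]]:
--     """Keep only pixels on the boundary of black regions.
--
--     Instead of probing all four neighbours of every pixel, scan adjacent
--     in-bounds PAIRS once horizontally and once vertically; whenever the two
--     cells of a pair differ in set-ness, mark the set cell of the pair.
--     """
--     out = [[0] * w for _ in range(h)]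
--     for y in range(h):
--         for x in range(w - 1):
--             a = mask[y][x]
--             b = mask[y][x + 1]
--             if (a != 0) != (b != 0):
--                 if a != 0:
--                     out[y][x] = 1
--                 else:
--                     out[y][x + 1] = 1
--     for y in range(h - 1):
--         for x in range(w):
--             a = mask[y][x]
--             b = mask[y + 1][x]
--             if (a != 0) != (b != 0):
--                 if a != 0:
--                     out[y][x] = 1
--                 else:
--                     out[y + 1][x] = 1
--     return out
-- ===== Notes on version B (the rewrite author's own statement) =====
-- stated objective: alternative
-- what changed: Replaces the per-pixel four-neighbour probe with two pair-sweep passes (horizontal then vertical) that mark the set cell of every differing in-bounds adjacent pair.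
import Mathlib
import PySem

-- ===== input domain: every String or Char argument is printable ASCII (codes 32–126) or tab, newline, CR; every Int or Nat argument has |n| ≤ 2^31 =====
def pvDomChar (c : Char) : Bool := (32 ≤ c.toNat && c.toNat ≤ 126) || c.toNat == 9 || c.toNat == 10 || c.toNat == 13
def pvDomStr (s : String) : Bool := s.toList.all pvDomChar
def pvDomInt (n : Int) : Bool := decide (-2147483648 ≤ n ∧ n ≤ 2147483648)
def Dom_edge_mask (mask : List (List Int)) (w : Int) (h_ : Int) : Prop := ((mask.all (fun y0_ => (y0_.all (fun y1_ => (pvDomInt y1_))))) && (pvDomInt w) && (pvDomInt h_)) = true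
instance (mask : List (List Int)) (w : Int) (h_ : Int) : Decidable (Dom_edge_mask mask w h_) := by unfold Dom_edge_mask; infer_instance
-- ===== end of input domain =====

-- B replaces the per-pixel four-neighbour probe with two sweeps over adjacent in-bounds pairs
-- (horizontal, then vertical), marking the set cell of each differing pair; same O(w*h) cost.

-- shared primitive helpers: mask[y][x] (in range under Pre_) and out[y][x] = 1
def pvGet2 (g : List (List Int)) (i j : Int) : Int :=
  PySem.List.pyGetD (PySem.List.pyGetD g i []) j 0

def pvMark (g : List (List Int)) (y x : Int) : List (List Int) :=
  PySem.List.pySetD g y (PySem.List.pySetD (PySem.List.pyGetD g y []) x 1)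

-- ===== PORT A =====
def edge_mask (mask : List (List Int)) (w : Int) (h_ : Int) : List (List Int) :=
  (PySem.List.pyRange 0 h_ 1).foldl (fun out y =>
    (PySem.List.pyRange 0 w 1).foldl (fun out x =>
      if pvGet2 mask y x = 0 then out
      else if (0 < x ∧ pvGet2 mask y (x-1) = 0) ∨ (x < w - 1 ∧ pvGet2 mask y (x+1) = 0)
             ∨ (0 < y ∧ pvGet2 mask (y-1) x = 0) ∨ (y < h_ - 1 ∧ pvGet2 mask (y+1) x = 0)
      then pvMark out y x else out) out)
    ((PySem.List.pyRange 0 h_ 1).map (fun _ => List.replicate w.toNat (0:Int)))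

-- ===== PORT B =====
def edge_mask_alt (mask : List (List Int)) (w : Int) (h_ : Int) : List (List Int) :=
  (PySem.List.pyRange 0 (h_ - 1) 1).foldl (fun out y =>
    (PySem.List.pyRange 0 w 1).foldl (fun out x =>
      if ¬ ((pvGet2 mask y x ≠ 0) ↔ (pvGet2 mask (y+1) x ≠ 0)) then
        (if pvGet2 mask y x ≠ 0 then pvMark out y x else pvMark out (y+1) x)
      else out) out)
    -- out after the horizontal pair pass, starting from the all-zero grid
    ((PySem.List.pyRange 0 h_ 1).foldl (fun out y =>
      (PySem.List.pyRange 0 (w - 1) 1).foldl (fun out x =>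
        if ¬ ((pvGet2 mask y x ≠ 0) ↔ (pvGet2 mask y (x+1) ≠ 0)) then
          (if pvGet2 mask y x ≠ 0 then pvMark out y x else pvMark out y (x+1))
        else out) out)
      ((PySem.List.pyRange 0 h_ 1).map (fun _ => List.replicate w.toNat (0:Int))))

-- ===== PRECONDITION & SPEC =====
-- Pre_ excludes exactly the inputs on which Python A raises IndexError: whenever w > 0,
-- every scanned row index y < h must exist in mask and each scanned row must have length ≥ w.
def Pre_edge_mask (mask : List (List Int)) (w : Int) (h_ : Int) : Prop :=
  0 < w → (h_ ≤ (mask.length : Int) ∧ ∀ row ∈ mask.take h_.toNat, w ≤ (row.length : Int))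
instance (mask : List (List Int)) (w : Int) (h_ : Int) : Decidable (Pre_edge_mask mask w h_) := by
  unfold Pre_edge_mask; infer_instance

def pvWitness_edge_mask : List (List Int) × Int × Int := ([[1, 0], [1, 1]], 2, 2)

def Spec_edge_mask (mask : List (List Int)) (w : Int) (h_ : Int) (out : List (List Int)) : Prop := out = edge_mask_alt mask w h_
instance (mask : List (List Int)) (w : Int) (h_ : Int) (out : List (List Int)) : Decidable (Spec_edge_mask mask w h_ out) := by unfold Spec_edge_mask; infer_instance

-- ===== CLAIM (what is proved, stated in full; the proofs are below) =====
def Claim_equal_edge_mask : Prop := ∀ (mask : List (List Int)) (w : Int) (h_ : Int), Dom_edge_mask mask w h_ → Pre_edge_mask mask w h_ → Spec_edge_mask mask w h_ (edge_mask mask w h_)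

-- ===== LEMMAS AND PROOFS =====

-- grid shape: H rows, each of width W
def pvShape (g : List (List Int)) (H W : Nat) : Prop :=
  g.length = H ∧ ∀ row ∈ g, row.length = W

lemma pvShape_zero (w h_ : Int) :
    pvShape ((PySem.List.pyRange 0 h_ 1).map (fun _ => List.replicate w.toNat (0:Int))) h_.toNat w.toNat := by
  constructor
  · simp [PySem.List.length_pyRange_one]
  · intro row hrow
    simp only [List.mem_map] at hrow
    obtain ⟨_, _, rfl⟩ := hrow
    simp

lemma pyGetD_zero_of_all {l : List Int} (j : Int) (h : ∀ v ∈ l, v = (0:Int)) :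
    PySem.List.pyGetD l j 0 = 0 := by
  unfold PySem.List.pyGetD
  cases hg : PySem.List.pyGet? l j with
  | none => rfl
  | some v => simpa using h v (PySem.List.mem_of_pyGet?_eq_some _ hg)

lemma pvGet2_zero (w h_ : Int) (i j : Int) :
    pvGet2 ((PySem.List.pyRange 0 h_ 1).map (fun _ => List.replicate w.toNat (0:Int))) i j = 0 := by
  unfold pvGet2
  apply pyGetD_zero_of_all
  intro v hv
  unfold PySem.List.pyGetD at hv
  cases hg : PySem.List.pyGet? ((PySem.List.pyRange 0 h_ 1).map (fun _ => List.replicate w.toNat (0:Int))) i with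
  | none => rw [hg] at hv; simp at hv
  | some row =>
    rw [hg] at hv
    have hrow := PySem.List.mem_of_pyGet?_eq_some _ hg
    simp only [List.mem_map] at hrow
    obtain ⟨_, _, rfl⟩ := hrow
    simpa using (List.eq_of_mem_replicate hv)

lemma pvShape_mark {g : List (List Int)} {H W : Nat} (hg : pvShape g H W)
    {y x : Int} (hy0 : 0 ≤ y) (hyH : y < (H : Int)) :
    pvShape (pvMark g y x) H W := by
  obtain ⟨hlen, hrows⟩ := hg
  have hyl : y.toNat < g.length := by omega
  unfold pvMark
  rw [PySem.List.pySetD_of_nonneg _ _ hy0]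
  refine ⟨by simpa using hlen, ?_⟩
  intro row hrow
  rcases List.mem_or_eq_of_mem_set hrow with h | h
  · exact hrows row h
  · subst h
    rw [PySem.List.pyGetD_eq_getElem _ _ hy0 (by omega)]
    rw [PySem.List.length_pySetD]
    exact hrows _ (List.getElem_mem _)

lemma pyGetD_set_ne {α : Type} (l : List α) (n : Nat) (v d : α) (j : Int)
    (hj : 0 ≤ j) (hne : j.toNat ≠ n) :
    PySem.List.pyGetD (l.set n v) j d = PySem.List.pyGetD l j d := by
  unfold PySem.List.pyGetD
  rw [PySem.List.pyGet?_of_nonneg _ hj, PySem.List.pyGet?_of_nonneg _ hj,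
      List.getElem?_set_ne (Ne.symm hne)]

lemma pvGet2_mark {g : List (List Int)} {H W : Nat} (hg : pvShape g H W)
    {y x i j : Int} (hy0 : 0 ≤ y) (hyH : y < (H : Int)) (hx0 : 0 ≤ x) (hxW : x < (W : Int))
    (hi : 0 ≤ i) (hj : 0 ≤ j) :
    pvGet2 (pvMark g y x) i j = if i = y ∧ j = x then 1 else pvGet2 g i j := by
  obtain ⟨hlen, hrows⟩ := hg
  have hyl : y.toNat < g.length := by omega
  have hrowlen : g[y.toNat].length = W := hrows _ (List.getElem_mem _)
  unfold pvMark pvGet2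
  rw [PySem.List.pySetD_of_nonneg _ _ hy0,
      PySem.List.pyGetD_eq_getElem _ _ hy0 (by omega),
      PySem.List.pySetD_of_nonneg _ _ hx0]
  by_cases hiy : i = y
  · subst hiy
    rw [PySem.List.pyGetD_eq_getElem _ _ hy0
        (by rw [List.length_set]; omega)]
    rw [List.getElem_set_self (by rw [List.length_set]; omega)]
    by_cases hjx : j = x
    · subst hjx
      rw [PySem.List.pyGetD_eq_getElem _ _ hx0 (by rw [List.length_set]; omega)]
      rw [List.getElem_set_self (by rw [List.length_set]; omega)]
      simp
    · rw [pyGetD_set_ne _ _ _ _ _ hj (by omega),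
          PySem.List.pyGetD_eq_getElem _ _ hi (by omega)]
      simp [hjx]
  · rw [pyGetD_set_ne _ _ _ _ _ hi (by omega)]
    simp [hiy]

-- a conditional-mark fold, characterised pointwise
lemma pvShape_foldl_mark {α : Type} (c : α → Prop) [DecidablePred c] (f : α → Int × Int)
    {H W : Nat} :
    ∀ (l : List α) (g : List (List Int)), pvShape g H W →
    (∀ a ∈ l, c a → 0 ≤ (f a).1 ∧ (f a).1 < (H:Int) ∧ 0 ≤ (f a).2 ∧ (f a).2 < (W:Int)) →
    pvShape (l.foldl (fun g a => if c a then pvMark g (f a).1 (f a).2 else g) g) H W := by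
  intro l
  induction l with
  | nil => intro g hg _; simpa using hg
  | cons a l ih =>
    intro g hg hl
    simp only [List.foldl_cons]
    apply ih
    · by_cases hca : c a
      · simp only [if_pos hca]
        exact pvShape_mark hg (hl a (by simp) hca).1 (by simpa [hg.1] using (hl a (by simp) hca).2.1)
      · simpa [hca] using hg
    · intro b hb; exact hl b (by simp [hb])

lemma pvGet2_foldl_mark {α : Type} (c : α → Prop) [DecidablePred c] (f : α → Int × Int)
    {H W : Nat} {i j : Int} (hi : 0 ≤ i) (hj : 0 ≤ j) :
    ∀ (l : List α) (g : List (List Int)), pvShape g H W →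
    (∀ a ∈ l, c a → 0 ≤ (f a).1 ∧ (f a).1 < (H:Int) ∧ 0 ≤ (f a).2 ∧ (f a).2 < (W:Int)) →
    pvGet2 (l.foldl (fun g a => if c a then pvMark g (f a).1 (f a).2 else g) g) i j
      = if (∃ a ∈ l, c a ∧ f a = (i, j)) then 1 else pvGet2 g i j := by
  intro l
  induction l with
  | nil => intro g _ _; simp
  | cons a l ih =>
    intro g hg hl
    simp only [List.foldl_cons]
    have hgs : pvShape (if c a then pvMark g (f a).1 (f a).2 else g) H W := by
      by_cases hca : c a
      · obtain ⟨h1, h2, h3, h4⟩ := hl a (by simp) hca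
        simpa [hca] using pvShape_mark hg h1 h2
      · simpa [hca] using hg
    rw [ih _ hgs (fun b hb hcb => hl b (by simp [hb]) hcb)]
    by_cases hex : ∃ b ∈ l, c b ∧ f b = (i, j)
    · rw [if_pos hex, if_pos (by obtain ⟨b, hb, h⟩ := hex; exact ⟨b, by simp [hb], h⟩)]
    · rw [if_neg hex]
      by_cases hca : c a
      · obtain ⟨h1, h2, h3, h4⟩ := hl a (by simp) hca
        rw [if_pos hca, pvGet2_mark hg h1 h2 h3 h4 hi hj]
        by_cases hfa : f a = (i, j)
        · rw [if_pos (by rw [Prod.ext_iff] at hfa; exact ⟨hfa.1.symm, hfa.2.symm⟩),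
              if_pos ⟨a, by simp, hca, hfa⟩]
        · rw [if_neg (by rintro ⟨rfl, rfl⟩; exact hfa (by simp)),
              if_neg (by rintro ⟨b, hb, hcb, hfb⟩
                         rcases List.mem_cons.1 hb with rfl | hb
                         · exact hfa hfb
                         · exact hex ⟨b, hb, hcb, hfb⟩)]
      · rw [if_neg hca,
            if_neg (by rintro ⟨b, hb, hcb, hfb⟩
                       rcases List.mem_cons.1 hb with rfl | hb
                       · exact hca hcb
                       · exact hex ⟨b, hb, hcb, hfb⟩)]

lemma pvFoldl_nest {β γ : Type} (ys : List β) (xs : List γ)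
    (step : List (List Int) → β × γ → List (List Int)) (g : List (List Int)) :
    ys.foldl (fun g y => xs.foldl (fun g x => step g (y, x)) g) g
      = (ys.flatMap (fun y => xs.map (fun x => (y, x)))).foldl step g := by
  induction ys generalizing g with
  | nil => rfl
  | cons y ys ih => simp [List.foldl_append, List.foldl_map, ih]

lemma pvGrid_eq {g1 g2 : List (List Int)} {H W : Nat} (h1 : pvShape g1 H W) (h2 : pvShape g2 H W)
    (hp : ∀ i j : Nat, i < H → j < W → pvGet2 g1 (i : Int) (j : Int) = pvGet2 g2 (i : Int) (j : Int)) :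
    g1 = g2 := by
  obtain ⟨hl1, hr1⟩ := h1
  obtain ⟨hl2, hr2⟩ := h2
  apply List.ext_getElem (by omega)
  intro n hn1 hn2
  have hw1 : g1[n].length = W := hr1 _ (List.getElem_mem _)
  have hw2 : g2[n].length = W := hr2 _ (List.getElem_mem _)
  apply List.ext_getElem (by omega)
  intro k hk1 hk2
  have h := hp n k (by omega) (by omega)
  unfold pvGet2 at h
  simp only [PySem.List.pyGetD_natCast] at h
  rw [List.getD_eq_getElem g1 _ hn1, List.getD_eq_getElem g2 _ hn2,
      List.getD_eq_getElem _ _ hk1, List.getD_eq_getElem _ _ hk2] at h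
  exact h

-- pixel positions scanned by each pass, and the conditions/targets of each write
def pvZero (w h_ : Int) : List (List Int) :=
  (PySem.List.pyRange 0 h_ 1).map (fun _ => List.replicate w.toNat (0:Int))

def pvPairsA (w h_ : Int) : List (Int × Int) :=
  (PySem.List.pyRange 0 h_ 1).flatMap (fun y => (PySem.List.pyRange 0 w 1).map (fun x => (y, x)))

def pvPairsH (w h_ : Int) : List (Int × Int) :=
  (PySem.List.pyRange 0 h_ 1).flatMap (fun y => (PySem.List.pyRange 0 (w - 1) 1).map (fun x => (y, x)))

def pvPairsV (w h_ : Int) : List (Int × Int) :=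
  (PySem.List.pyRange 0 (h_ - 1) 1).flatMap (fun y => (PySem.List.pyRange 0 w 1).map (fun x => (y, x)))

abbrev pvCA (mask : List (List Int)) (w h_ : Int) (p : Int × Int) : Prop :=
  pvGet2 mask p.1 p.2 ≠ 0 ∧
    ((0 < p.2 ∧ pvGet2 mask p.1 (p.2 - 1) = 0) ∨ (p.2 < w - 1 ∧ pvGet2 mask p.1 (p.2 + 1) = 0)
      ∨ (0 < p.1 ∧ pvGet2 mask (p.1 - 1) p.2 = 0) ∨ (p.1 < h_ - 1 ∧ pvGet2 mask (p.1 + 1) p.2 = 0))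

abbrev pvCH (mask : List (List Int)) (p : Int × Int) : Prop :=
  ¬ ((pvGet2 mask p.1 p.2 ≠ 0) ↔ (pvGet2 mask p.1 (p.2 + 1) ≠ 0))

def pvTH (mask : List (List Int)) (p : Int × Int) : Int × Int :=
  if pvGet2 mask p.1 p.2 ≠ 0 then p else (p.1, p.2 + 1)

abbrev pvCV (mask : List (List Int)) (p : Int × Int) : Prop :=
  ¬ ((pvGet2 mask p.1 p.2 ≠ 0) ↔ (pvGet2 mask (p.1 + 1) p.2 ≠ 0))

def pvTV (mask : List (List Int)) (p : Int × Int) : Int × Int :=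
  if pvGet2 mask p.1 p.2 ≠ 0 then p else (p.1 + 1, p.2)

lemma edge_mask_canon (mask : List (List Int)) (w h_ : Int) :
    edge_mask mask w h_
      = (pvPairsA w h_).foldl
          (fun g p => if pvCA mask w h_ p then pvMark g p.1 p.2 else g) (pvZero w h_) := by
  unfold edge_mask pvPairsA pvZero
  rw [← pvFoldl_nest]
  congr 1
  funext out y
  congr 1
  funext out x
  show (if pvGet2 mask y x = 0 then out
        else if (0 < x ∧ pvGet2 mask y (x-1) = 0) ∨ (x < w - 1 ∧ pvGet2 mask y (x+1) = 0)
               ∨ (0 < y ∧ pvGet2 mask (y-1) x = 0) ∨ (y < h_ - 1 ∧ pvGet2 mask (y+1) x = 0)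
             then pvMark out y x else out)
      = (if pvGet2 mask y x ≠ 0 ∧ ((0 < x ∧ pvGet2 mask y (x-1) = 0) ∨ (x < w - 1 ∧ pvGet2 mask y (x+1) = 0)
               ∨ (0 < y ∧ pvGet2 mask (y-1) x = 0) ∨ (y < h_ - 1 ∧ pvGet2 mask (y+1) x = 0))
         then pvMark out y x else out)
  split_ifs <;> first | rfl | tauto

lemma edge_mask_alt_canon (mask : List (List Int)) (w h_ : Int) :
    edge_mask_alt mask w h_
      = (pvPairsV w h_).foldl
          (fun g p => if pvCV mask p then pvMark g (pvTV mask p).1 (pvTV mask p).2 else g)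
          ((pvPairsH w h_).foldl
            (fun g p => if pvCH mask p then pvMark g (pvTH mask p).1 (pvTH mask p).2 else g)
            (pvZero w h_)) := by
  unfold edge_mask_alt pvPairsH pvPairsV pvZero
  rw [← pvFoldl_nest, ← pvFoldl_nest]
  congr 1
  · funext out y
    congr 1
    funext out x
    show (if ¬ ((pvGet2 mask y x ≠ 0) ↔ (pvGet2 mask (y+1) x ≠ 0)) then
            (if pvGet2 mask y x ≠ 0 then pvMark out y x else pvMark out (y+1) x)
          else out)
        = (if pvCV mask (y, x) then pvMark out (pvTV mask (y, x)).1 (pvTV mask (y, x)).2 else out)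
    by_cases hm : pvGet2 mask y x ≠ 0 <;> simp [pvCV, pvTV, hm]
  · congr 1
    funext out y
    congr 1
    funext out x
    show (if ¬ ((pvGet2 mask y x ≠ 0) ↔ (pvGet2 mask y (x+1) ≠ 0)) then
            (if pvGet2 mask y x ≠ 0 then pvMark out y x else pvMark out y (x+1))
          else out)
        = (if pvCH mask (y, x) then pvMark out (pvTH mask (y, x)).1 (pvTH mask (y, x)).2 else out)
    by_cases hm : pvGet2 mask y x ≠ 0 <;> simp [pvCH, pvTH, hm]

lemma pvMemA {w h_ : Int} {p : Int × Int} (h : p ∈ pvPairsA w h_) :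
    0 ≤ p.1 ∧ p.1 < h_ ∧ 0 ≤ p.2 ∧ p.2 < w := by
  simp only [pvPairsA, List.mem_flatMap, List.mem_map, PySem.List.mem_pyRange_one] at h
  obtain ⟨y, hy, x, hx, rfl⟩ := h
  exact ⟨hy.1, hy.2, hx.1, hx.2⟩

lemma pvMemH {w h_ : Int} {p : Int × Int} (h : p ∈ pvPairsH w h_) :
    0 ≤ p.1 ∧ p.1 < h_ ∧ 0 ≤ p.2 ∧ p.2 < w - 1 := by
  simp only [pvPairsH, List.mem_flatMap, List.mem_map, PySem.List.mem_pyRange_one] at h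
  obtain ⟨y, hy, x, hx, rfl⟩ := h
  exact ⟨hy.1, hy.2, hx.1, hx.2⟩

lemma pvMemV {w h_ : Int} {p : Int × Int} (h : p ∈ pvPairsV w h_) :
    0 ≤ p.1 ∧ p.1 < h_ - 1 ∧ 0 ≤ p.2 ∧ p.2 < w := by
  simp only [pvPairsV, List.mem_flatMap, List.mem_map, PySem.List.mem_pyRange_one] at h
  obtain ⟨y, hy, x, hx, rfl⟩ := h
  exact ⟨hy.1, hy.2, hx.1, hx.2⟩

lemma pvBoundsA (mask : List (List Int)) (w h_ : Int) :
    ∀ p ∈ pvPairsA w h_, pvCA mask w h_ p →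
      0 ≤ ((fun q => q) p).1 ∧ ((fun q => q) p).1 < (h_.toNat : Int)
        ∧ 0 ≤ ((fun q => q) p).2 ∧ ((fun q => q) p).2 < (w.toNat : Int) := by
  intro p hp _
  obtain ⟨a, b, c, d⟩ := pvMemA hp
  show 0 ≤ p.1 ∧ p.1 < (h_.toNat : Int) ∧ 0 ≤ p.2 ∧ p.2 < (w.toNat : Int)
  exact ⟨a, by omega, c, by omega⟩

lemma pvBoundsH (mask : List (List Int)) (w h_ : Int) :
    ∀ p ∈ pvPairsH w h_, pvCH mask p →
      0 ≤ (pvTH mask p).1 ∧ (pvTH mask p).1 < (h_.toNat : Int)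
        ∧ 0 ≤ (pvTH mask p).2 ∧ (pvTH mask p).2 < (w.toNat : Int) := by
  intro p hp _
  obtain ⟨a, b, c, d⟩ := pvMemH hp
  unfold pvTH
  split
  · exact ⟨a, by omega, c, by omega⟩
  · refine ⟨?_, ?_, ?_, ?_⟩ <;> simp <;> omega

lemma pvBoundsV (mask : List (List Int)) (w h_ : Int) :
    ∀ p ∈ pvPairsV w h_, pvCV mask p →
      0 ≤ (pvTV mask p).1 ∧ (pvTV mask p).1 < (h_.toNat : Int)
        ∧ 0 ≤ (pvTV mask p).2 ∧ (pvTV mask p).2 < (w.toNat : Int) := by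
  intro p hp _
  obtain ⟨a, b, c, d⟩ := pvMemV hp
  unfold pvTV
  split
  · exact ⟨a, by omega, c, by omega⟩
  · refine ⟨?_, ?_, ?_, ?_⟩ <;> simp <;> omega

lemma pvShapeZero (w h_ : Int) : pvShape (pvZero w h_) h_.toNat w.toNat := by
  unfold pvZero; exact pvShape_zero w h_

lemma edge_mask_shape (mask : List (List Int)) (w h_ : Int) :
    pvShape (edge_mask mask w h_) h_.toNat w.toNat := by
  rw [edge_mask_canon]
  exact pvShape_foldl_mark (pvCA mask w h_) (fun q => q) _ _ (pvShapeZero w h_) (pvBoundsA mask w h_)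

lemma edge_mask_get (mask : List (List Int)) (w h_ : Int) {i j : Int} (hi : 0 ≤ i) (hj : 0 ≤ j) :
    pvGet2 (edge_mask mask w h_) i j
      = if ∃ p ∈ pvPairsA w h_, pvCA mask w h_ p ∧ p = (i, j) then 1 else 0 := by
  rw [edge_mask_canon,
      pvGet2_foldl_mark (pvCA mask w h_) (fun q => q) hi hj _ _ (pvShapeZero w h_) (pvBoundsA mask w h_)]
  simp only [pvZero, pvGet2_zero]

lemma edge_mask_alt_shape (mask : List (List Int)) (w h_ : Int) :
    pvShape (edge_mask_alt mask w h_) h_.toNat w.toNat := by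
  rw [edge_mask_alt_canon]
  exact pvShape_foldl_mark (pvCV mask) (pvTV mask) _ _
    (pvShape_foldl_mark (pvCH mask) (pvTH mask) _ _ (pvShapeZero w h_) (pvBoundsH mask w h_))
    (pvBoundsV mask w h_)

lemma edge_mask_alt_get (mask : List (List Int)) (w h_ : Int) {i j : Int} (hi : 0 ≤ i) (hj : 0 ≤ j) :
    pvGet2 (edge_mask_alt mask w h_) i j
      = if (∃ p ∈ pvPairsV w h_, pvCV mask p ∧ pvTV mask p = (i, j))
           ∨ (∃ p ∈ pvPairsH w h_, pvCH mask p ∧ pvTH mask p = (i, j)) then 1 else 0 := by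
  rw [edge_mask_alt_canon,
      pvGet2_foldl_mark (pvCV mask) (pvTV mask) hi hj _ _
        (pvShape_foldl_mark (pvCH mask) (pvTH mask) _ _ (pvShapeZero w h_) (pvBoundsH mask w h_))
        (pvBoundsV mask w h_),
      pvGet2_foldl_mark (pvCH mask) (pvTH mask) hi hj _ _ (pvShapeZero w h_) (pvBoundsH mask w h_)]
  simp only [pvZero, pvGet2_zero]
  by_cases hV : ∃ p ∈ pvPairsV w h_, pvCV mask p ∧ pvTV mask p = (i, j) <;>
    by_cases hH : ∃ p ∈ pvPairsH w h_, pvCH mask p ∧ pvTH mask p = (i, j) <;>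
      simp [hV, hH]

lemma pvMemA' {w h_ y x : Int} (h1 : 0 ≤ y) (h2 : y < h_) (h3 : 0 ≤ x) (h4 : x < w) :
    (y, x) ∈ pvPairsA w h_ := by
  simp only [pvPairsA, List.mem_flatMap, List.mem_map, PySem.List.mem_pyRange_one]
  exact ⟨y, ⟨h1, h2⟩, x, ⟨h3, h4⟩, rfl⟩

lemma pvMemH' {w h_ y x : Int} (h1 : 0 ≤ y) (h2 : y < h_) (h3 : 0 ≤ x) (h4 : x < w - 1) :
    (y, x) ∈ pvPairsH w h_ := by
  simp only [pvPairsH, List.mem_flatMap, List.mem_map, PySem.List.mem_pyRange_one]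
  exact ⟨y, ⟨h1, h2⟩, x, ⟨h3, h4⟩, rfl⟩

lemma pvMemV' {w h_ y x : Int} (h1 : 0 ≤ y) (h2 : y < h_ - 1) (h3 : 0 ≤ x) (h4 : x < w) :
    (y, x) ∈ pvPairsV w h_ := by
  simp only [pvPairsV, List.mem_flatMap, List.mem_map, PySem.List.mem_pyRange_one]
  exact ⟨y, ⟨h1, h2⟩, x, ⟨h3, h4⟩, rfl⟩

lemma pvExA_iff (mask : List (List Int)) (w h_ : Int) (i j : Int)
    (hi0 : 0 ≤ i) (hih : i < h_) (hj0 : 0 ≤ j) (hjw : j < w) :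
    (∃ p ∈ pvPairsA w h_, pvCA mask w h_ p ∧ p = (i, j)) ↔ pvCA mask w h_ (i, j) := by
  constructor
  · rintro ⟨p, _, hc, rfl⟩
    exact hc
  · intro hc
    exact ⟨(i, j), pvMemA' hi0 hih hj0 hjw, hc, rfl⟩

lemma pvExH_iff (mask : List (List Int)) (w h_ : Int) (i j : Int)
    (hi0 : 0 ≤ i) (hih : i < h_) (hj0 : 0 ≤ j) (hjw : j < w) :
    (∃ p ∈ pvPairsH w h_, pvCH mask p ∧ pvTH mask p = (i, j))
      ↔ ((0 < j ∧ pvGet2 mask i (j - 1) = 0 ∧ pvGet2 mask i j ≠ 0)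
          ∨ (j < w - 1 ∧ pvGet2 mask i j ≠ 0 ∧ pvGet2 mask i (j + 1) = 0)) := by
  constructor
  · rintro ⟨⟨y, x⟩, hp, hc, ht⟩
    obtain ⟨hy0, hyh, hx0, hxw⟩ := pvMemH hp
    simp only [pvCH] at hc
    unfold pvTH at ht
    by_cases hm : pvGet2 mask (y, x).1 (y, x).2 ≠ 0
    · rw [if_pos hm] at ht
      obtain ⟨h1, h2⟩ := Prod.mk.inj ht
      subst h1; subst h2
      exact Or.inr ⟨by simpa using hxw, by simpa using hm, by simpa using (by tauto : ¬ pvGet2 mask (y, x).1 ((y, x).2 + 1) ≠ 0)⟩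
    · rw [if_neg hm] at ht
      obtain ⟨h1, h2⟩ := Prod.mk.inj ht
      subst h1; subst h2
      refine Or.inl ⟨by simpa using (by omega : 0 < x + 1), ?_, ?_⟩
      · simpa using (by simpa using hm : pvGet2 mask y x = 0)
      · simpa using (by tauto : pvGet2 mask (y, x).1 ((y, x).2 + 1) ≠ 0)
  · rintro (⟨h1, h2, h3⟩ | ⟨h1, h2, h3⟩)
    · refine ⟨(i, j - 1), pvMemH' hi0 hih (by omega) (by omega), ?_, ?_⟩
      · show ¬ (pvGet2 mask i (j - 1) ≠ 0 ↔ pvGet2 mask i (j - 1 + 1) ≠ 0)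
        rw [show j - 1 + 1 = j from by ring]
        simp [h2, h3]
      · show pvTH mask (i, j - 1) = (i, j)
        unfold pvTH
        rw [if_neg (by simpa using h2)]
        rw [show j - 1 + 1 = j from by ring]
    · refine ⟨(i, j), pvMemH' hi0 hih hj0 h1, ?_, ?_⟩
      · show ¬ (pvGet2 mask i j ≠ 0 ↔ pvGet2 mask i (j + 1) ≠ 0)
        simp [h2, h3]
      · show pvTH mask (i, j) = (i, j)
        unfold pvTH
        rw [if_pos (by simpa using h2)]

lemma pvExV_iff (mask : List (List Int)) (w h_ : Int) (i j : Int)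
    (hi0 : 0 ≤ i) (hih : i < h_) (hj0 : 0 ≤ j) (hjw : j < w) :
    (∃ p ∈ pvPairsV w h_, pvCV mask p ∧ pvTV mask p = (i, j))
      ↔ ((0 < i ∧ pvGet2 mask (i - 1) j = 0 ∧ pvGet2 mask i j ≠ 0)
          ∨ (i < h_ - 1 ∧ pvGet2 mask i j ≠ 0 ∧ pvGet2 mask (i + 1) j = 0)) := by
  constructor
  · rintro ⟨⟨y, x⟩, hp, hc, ht⟩
    obtain ⟨hy0, hyh, hx0, hxw⟩ := pvMemV hp
    simp only [pvCV] at hc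
    unfold pvTV at ht
    by_cases hm : pvGet2 mask (y, x).1 (y, x).2 ≠ 0
    · rw [if_pos hm] at ht
      obtain ⟨h1, h2⟩ := Prod.mk.inj ht
      subst h1; subst h2
      exact Or.inr ⟨by simpa using hyh, by simpa using hm, by simpa using (by tauto : ¬ pvGet2 mask ((y, x).1 + 1) (y, x).2 ≠ 0)⟩
    · rw [if_neg hm] at ht
      obtain ⟨h1, h2⟩ := Prod.mk.inj ht
      subst h1; subst h2
      refine Or.inl ⟨by simpa using (by omega : 0 < y + 1), ?_, ?_⟩
      · simpa using (by simpa using hm : pvGet2 mask y x = 0)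
      · simpa using (by tauto : pvGet2 mask ((y, x).1 + 1) (y, x).2 ≠ 0)
  · rintro (⟨h1, h2, h3⟩ | ⟨h1, h2, h3⟩)
    · refine ⟨(i - 1, j), pvMemV' (by omega) (by omega) hj0 hjw, ?_, ?_⟩
      · show ¬ (pvGet2 mask (i - 1) j ≠ 0 ↔ pvGet2 mask (i - 1 + 1) j ≠ 0)
        rw [show i - 1 + 1 = i from by ring]
        simp [h2, h3]
      · show pvTV mask (i - 1, j) = (i, j)
        unfold pvTV
        rw [if_neg (by simpa using h2)]
        rw [show i - 1 + 1 = i from by ring]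
    · refine ⟨(i, j), pvMemV' hi0 (by omega) hj0 hjw, ?_, ?_⟩
      · show ¬ (pvGet2 mask i j ≠ 0 ↔ pvGet2 mask (i + 1) j ≠ 0)
        simp [h2, h3]
      · show pvTV mask (i, j) = (i, j)
        unfold pvTV
        rw [if_pos (by simpa using h2)]

lemma pvCond_iff (mask : List (List Int)) (w h_ : Int) (i j : Int)
    (hi0 : 0 ≤ i) (hih : i < h_) (hj0 : 0 ≤ j) (hjw : j < w) :
    (∃ p ∈ pvPairsA w h_, pvCA mask w h_ p ∧ p = (i, j))
      ↔ ((∃ p ∈ pvPairsV w h_, pvCV mask p ∧ pvTV mask p = (i, j))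
          ∨ (∃ p ∈ pvPairsH w h_, pvCH mask p ∧ pvTH mask p = (i, j))) := by
  rw [pvExA_iff mask w h_ i j hi0 hih hj0 hjw, pvExV_iff mask w h_ i j hi0 hih hj0 hjw,
      pvExH_iff mask w h_ i j hi0 hih hj0 hjw]
  unfold pvCA
  tauto

-- ===== VERDICT (by name: the statement is the Claim_ definition above) =====
theorem edge_mask_spec : Claim_equal_edge_mask := by
  intro mask w h_ _hdom _hpre
  unfold Spec_edge_mask
  apply pvGrid_eq (edge_mask_shape mask w h_) (edge_mask_alt_shape mask w h_)
  intro i j hiH hjW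
  rw [edge_mask_get mask w h_ (Int.natCast_nonneg i) (Int.natCast_nonneg j),
      edge_mask_alt_get mask w h_ (Int.natCast_nonneg i) (Int.natCast_nonneg j)]
  rw [if_congr (pvCond_iff mask w h_ i j (Int.natCast_nonneg i) (by omega)
        (Int.natCast_nonneg j) (by omega)) rfl rfl]
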